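-- pv_equiv track=rewrite | github.com/fn-r/coding-questions | codewars/Python/7kyu/Parts of a list.py | partlist
-- ===== SOURCE A (Python) =====
-- def partlist(arr):
--     pl = []
--     for i in range(len(arr) - 1):
--         temp = []
--         temp.append(' '.join(arr[:i+1]))
--         temp.append(' '.join(arr[i+1:]))
--         pl.append(tuple(temp))
--     return pl
-- ===== SOURCE B (Python) =====
-- def partlist(arr):
--     # Two-table approach: accumulate prefix joins front-to-back and suffix joins
--     # back-to-front, then pair them up; no per-split slicing or joining.
--     n = len(arr)
--     if n < 2:
--         return []
--     acc = arr[0]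
--     pref = [acc]
--     for w in arr[1:n-1]:
--         acc = acc + ' ' + w
--         pref.append(acc)
--     acc = arr[n-1]
--     suf = [acc]
--     for w in reversed(arr[1:n-1]):
--         acc = w + ' ' + acc
--         suf.append(acc)
--     suf.reverse()
--     return list(zip(pref, suf))
-- ===== Notes on version B (the rewrite author's own statement) =====
-- stated objective: faster
-- what changed: A loops over split indices and re-slices and re-joins both halves at every index; B makes two accumulation passes (prefix joins front-to-back, suffix joins back-to-front) and then pairs the two tables, so each table entry extends the previous string instead of re-joining a whole half.
import Mathlib
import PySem

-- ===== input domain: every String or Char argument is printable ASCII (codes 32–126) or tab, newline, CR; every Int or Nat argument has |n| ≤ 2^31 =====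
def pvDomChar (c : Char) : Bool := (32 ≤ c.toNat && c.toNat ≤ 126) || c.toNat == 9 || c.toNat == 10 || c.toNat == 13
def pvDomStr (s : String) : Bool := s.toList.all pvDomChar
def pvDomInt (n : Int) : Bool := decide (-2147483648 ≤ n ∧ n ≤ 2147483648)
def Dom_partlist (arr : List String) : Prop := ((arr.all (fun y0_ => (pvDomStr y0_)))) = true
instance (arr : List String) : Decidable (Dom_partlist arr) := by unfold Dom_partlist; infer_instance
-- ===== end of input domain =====

-- B replaces A's per-split slice-and-join passes by two accumulation passes (prefix joins
-- front-to-back, suffix joins back-to-front) that are then paired up (objective: faster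
-- by a constant factor: no re-joining of both halves at every split point).

-- ===== PORT A =====
def partlist (arr : List String) : List (String × String) :=
  (PySem.List.pyRange 0 ((arr.length : Int) - 1) 1).foldl
    (fun pl i =>
      pl ++ [(PySem.Str.join " " (PySem.List.slice arr none (some (i + 1))),
              PySem.Str.join " " (PySem.List.slice arr (some (i + 1)) none))])
    []

-- ===== PORT B =====
def partlist_alt (arr : List String) : List (String × String) :=
  if arr.length < 2 then []
  else
    let mid := PySem.List.slice arr (some 1) (some ((arr.length : Int) - 1))
    let a0 := PySem.List.pyGetD arr 0 ""
    let p := mid.foldl (fun (s : List String × String) w =>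
        (s.1 ++ [s.2 ++ " " ++ w], s.2 ++ " " ++ w)) ([a0], a0)
    let aN := PySem.List.pyGetD arr ((arr.length : Int) - 1) ""
    let q := mid.reverse.foldl (fun (s : List String × String) w =>
        (s.1 ++ [w ++ " " ++ s.2], w ++ " " ++ s.2)) ([aN], aN)
    p.1.zip q.1.reverse

-- ===== PRECONDITION & SPEC =====
def Spec_partlist (arr : List String) (out : List (String × String)) : Prop := out = partlist_alt arr
instance (arr : List String) (out : List (String × String)) : Decidable (Spec_partlist arr out) := by unfold Spec_partlist; infer_instance

-- ===== CLAIM (what is proved, stated in full; the proofs are below) =====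
def Claim_equal_partlist : Prop := ∀ (arr : List String), Dom_partlist arr → Spec_partlist arr (partlist arr)

-- ===== LEMMAS AND PROOFS =====

-- the common closed form: the i-th split is (join of the first i+1 words, join of the rest)
def pvSplits (arr : List String) : List (String × String) :=
  (List.range (arr.length - 1)).map
    (fun i => (PySem.Str.join " " (arr.take (i + 1)), PySem.Str.join " " (arr.drop (i + 1))))

theorem pv_foldl_push {α β : Type} (f : α → β) (l : List α) (acc : List β) :
    l.foldl (fun acc i => acc ++ [f i]) acc = acc ++ l.map f := by
  induction l generalizing acc <;> simp [*]

theorem pvA_eq (arr : List String) : partlist arr = pvSplits arr := by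
  unfold partlist pvSplits
  rw [PySem.List.pyRange_one, pv_foldl_push]
  simp only [List.map_map, List.nil_append]
  have hn : (((arr.length : Int) - 1) - 0).toNat = arr.length - 1 := by omega
  rw [hn]
  refine List.map_congr_left ?_
  intro k _
  have h1 : ((0 : Int) + k + 1) = ((k + 1 : Nat) : Int) := by push_cast; ring
  simp only [Function.comp, h1, PySem.List.slice_to_natCast, PySem.List.slice_from_natCast]

theorem pv_join_singleton (a : String) : PySem.Str.join " " [a] = a := by
  simp [PySem.Str.join]

theorem pv_join_cons (a : String) (l : List String) (h : l ≠ []) :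
    PySem.Str.join " " (a :: l) = a ++ " " ++ PySem.Str.join " " l := by
  obtain ⟨b, t, rfl⟩ := List.exists_cons_of_ne_nil h
  simp only [PySem.Str.join, List.map_cons, PySem.Chars.join_cons_cons]
  apply String.toList_injective
  simp [PySem.Chars.join]

-- gluing two adjacent words equals joining them separately
theorem pv_join_glue (l : List String) (a w : String) (t : List String) :
    PySem.Str.join " " (l ++ (a ++ " " ++ w) :: t) = PySem.Str.join " " (l ++ a :: w :: t) := by
  induction l with
  | nil =>
    cases t with
    | nil => simp [pv_join_singleton, pv_join_cons a [w] (by simp)]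
    | cons u t' =>
      rw [List.nil_append, List.nil_append, pv_join_cons _ (u :: t') (by simp),
        pv_join_cons a (w :: u :: t') (by simp), pv_join_cons w (u :: t') (by simp)]
      simp [String.append_assoc]
  | cons x l' ih =>
    rw [List.cons_append, List.cons_append, pv_join_cons x _ (by simp),
      pv_join_cons x _ (by simp), ih]

def pvJf (a : String) (l : List String) : String := l.foldl (fun s w => s ++ " " ++ w) a
def pvJb (b : String) (l : List String) : String := l.foldl (fun s w => w ++ " " ++ s) b

theorem pvJf_eq (l : List String) (a : String) :
    pvJf a l = PySem.Str.join " " (a :: l) := by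
  induction l generalizing a with
  | nil => simp [pvJf, pv_join_singleton]
  | cons w t ih =>
    show pvJf (a ++ " " ++ w) t = _
    rw [ih]
    exact pv_join_glue [] a w t

theorem pvJb_eq (l : List String) (b : String) :
    pvJb b l = PySem.Str.join " " (l.reverse ++ [b]) := by
  induction l generalizing b with
  | nil => simp [pvJb, pv_join_singleton]
  | cons w t ih =>
    show pvJb (w ++ " " ++ b) t = _
    rw [ih]
    simpa using pv_join_glue t.reverse w b []

theorem pv_pref_fold (ws P0 : List String) (a : String) :
    ws.foldl (fun (s : List String × String) w =>
        (s.1 ++ [s.2 ++ " " ++ w], s.2 ++ " " ++ w)) (P0, a)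
      = (P0 ++ (List.range ws.length).map (fun k => pvJf a (ws.take (k + 1))), pvJf a ws) := by
  induction ws generalizing P0 a with
  | nil => simp [pvJf]
  | cons w t ih =>
    simp only [List.foldl_cons, ih, List.length_cons, List.range_succ_eq_map, List.map_cons,
      List.map_map, List.take_succ_cons]
    simp only [Prod.mk.injEq]
    refine ⟨?_, rfl⟩
    simp [Function.comp, List.append_assoc]
    exact ⟨rfl, fun _ _ => rfl⟩

theorem pv_suf_fold (ws S0 : List String) (b : String) :
    ws.foldl (fun (s : List String × String) w =>
        (s.1 ++ [w ++ " " ++ s.2], w ++ " " ++ s.2)) (S0, b)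
      = (S0 ++ (List.range ws.length).map (fun k => pvJb b (ws.take (k + 1))), pvJb b ws) := by
  induction ws generalizing S0 b with
  | nil => simp [pvJb]
  | cons w t ih =>
    simp only [List.foldl_cons, ih, List.length_cons, List.range_succ_eq_map, List.map_cons,
      List.map_map, List.take_succ_cons]
    simp only [Prod.mk.injEq]
    refine ⟨?_, rfl⟩
    simp [Function.comp, List.append_assoc]
    exact ⟨rfl, fun _ _ => rfl⟩

theorem pv_map_range_rev {β : Type} (g : Nat → β) (m : Nat) :
    ((List.range m).map (fun k => g (m - 1 - k))).reverse = (List.range m).map g := by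
  apply List.ext_getElem (by simp)
  intro i h1 h2
  have hm : i < m := by simpa using h2
  rw [List.getElem_reverse]
  simp only [List.length_map, List.length_range, List.getElem_map, List.getElem_range]
  congr 1
  omega

theorem pvB_eq (arr : List String) : partlist_alt arr = pvSplits arr := by
  by_cases h : arr.length < 2
  · unfold partlist_alt pvSplits
    rw [if_pos h]
    have h1 : arr.length - 1 = 0 := by omega
    simp [h1]
  · obtain ⟨x, tl, rfl⟩ : ∃ x tl, arr = x :: tl := by
      cases arr with
      | nil => simp at h
      | cons a t => exact ⟨a, t, rfl⟩
    rcases List.eq_nil_or_concat tl with rfl | ⟨ms, z, rfl⟩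
    · simp at h
    simp only [List.concat_eq_append] at *
    unfold partlist_alt pvSplits
    rw [if_neg h]
    have hlen : (x :: (ms ++ [z])).length = ms.length + 2 := by simp
    have hmid : PySem.List.slice (x :: (ms ++ [z])) (some 1)
        (some (((x :: (ms ++ [z])).length : Int) - 1)) = ms := by
      rw [PySem.List.slice_toNat _ (by omega) (by simp; omega)]
      simp [hlen]
      rw [show ((ms.length : Int) + 2).toNat - 1 - 1 = ms.length by omega]
      exact List.take_left
    have ha0 : PySem.List.pyGetD (x :: (ms ++ [z])) 0 "" = x := by
      simp [PySem.List.pyGetD, PySem.List.pyGet?, PySem.List.pyIdx?,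
        show (0:Int) ≤ (ms.length:Int) + 1 from by omega]
    have haN : PySem.List.pyGetD (x :: (ms ++ [z])) (((x :: (ms ++ [z])).length : Int) - 1) "" = z := by
      rw [hlen, show ((ms.length + 2 : Nat) : Int) - 1 = ((ms.length + 1 : Nat) : Int) by push_cast; ring,
        PySem.List.pyGetD_natCast]
      rw [show x :: (ms ++ [z]) = (x :: ms) ++ [z] by simp]
      simp
    rw [hmid, ha0, haN]
    dsimp only
    rw [pv_pref_fold, pv_suf_fold]
    simp only [hlen, List.length_reverse]
    have hpref : [x] ++ (List.range ms.length).map (fun k => pvJf x (ms.take (k + 1)))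
        = (List.range (ms.length + 1)).map
            (fun i => PySem.Str.join " " ((x :: (ms ++ [z])).take (i + 1))) := by
      rw [List.range_succ_eq_map]
      simp only [List.map_cons, List.map_map, List.singleton_append]
      congr 1
      · simp [pv_join_singleton]
      refine List.map_congr_left ?_
      intro k hk
      have hk' : k + 1 ≤ ms.length := List.mem_range.mp hk
      simp only [Function.comp, Nat.succ_eq_add_one, List.take_succ_cons,
        List.take_append_of_le_length hk']
      exact pvJf_eq _ _
    have hsuf : ([z] ++ (List.range ms.length).map
          (fun k => pvJb z (ms.reverse.take (k + 1)))).reverse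
        = (List.range (ms.length + 1)).map
            (fun i => PySem.Str.join " " ((x :: (ms ++ [z])).drop (i + 1))) := by
      rw [List.reverse_append, List.range_succ, List.map_append]
      simp only [List.reverse_cons, List.reverse_nil, List.nil_append, List.map_cons, List.map_nil]
      congr 1
      · rw [List.map_congr_left (l := List.range ms.length)
          (f := fun k => pvJb z (ms.reverse.take (k + 1)))
          (g := fun k => (fun i => PySem.Str.join " "
            ((x :: (ms ++ [z])).drop (i + 1))) (ms.length - 1 - k)) ?_]
        · simpa using pv_map_range_rev
            (fun i => PySem.Str.join " " (List.drop (i + 1) (x :: (ms ++ [z])))) ms.length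
        intro k hk
        have hk' : k < ms.length := List.mem_range.mp hk
        dsimp only
        rw [pvJb_eq, List.take_reverse, List.reverse_reverse]
        simp only [List.drop_succ_cons,
          List.drop_append_of_le_length (show ms.length - 1 - k ≤ ms.length by omega)]
        rw [Nat.sub_sub, Nat.add_comm 1 k]
      · simp only [List.drop_succ_cons,
          List.drop_append_of_le_length (le_refl ms.length), List.drop_length,
          List.nil_append]
        simp [pv_join_singleton]
    rw [hpref, hsuf, List.zip_map', show ms.length + 2 - 1 = ms.length + 1 from rfl]

-- ===== VERDICT (by name: the statement is the Claim_ definition above) =====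
theorem partlist_spec : Claim_equal_partlist := by
  intro arr _
  unfold Spec_partlist
  rw [pvA_eq, pvB_eq]
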